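-- pv_equiv track=rewrite | github.com/yura103/meetup-streamlit | streamlit_app.py | build_person_day_map
-- ===== SOURCE A (Python) =====
-- def build_person_day_map(days_seq, names_by_day):
--     persons=set()
--     for d in days_seq:
--         for s in ("full","am","pm","eve"):
--             for n in names_by_day.get(d,{}).get(s, []):
--                 persons.add(n)
--     persons=sorted(persons, key=lambda x:x.lower())
--     pmap={n:{} for n in persons}
--     for d in days_seq:
--         for s in ("full","am","pm","eve"):
--             for n in names_by_day.get(d,{}).get(s, []):
--                 pmap[n][d]=s
--         for n in persons:
--             pmap[n].setdefault(d,"off")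
--     return persons, pmap
-- ===== SOURCE B (Python) =====
-- def build_person_day_map(days_seq, names_by_day):
--     slots = ("full", "am", "pm", "eve")
--
--     def slot_of(n, d):
--         # the slot finally recorded for n on day d: last matching slot, else "off"
--         out = "off"
--         for s in slots:
--             if n in names_by_day.get(d, {}).get(s, []):
--                 out = s
--         return out
--
--     persons = sorted({n for d in days_seq for s in slots
--                       for n in names_by_day.get(d, {}).get(s, [])},
--                      key=lambda x: x.lower())
--     days = list(dict.fromkeys(days_seq))
--     pmap = {n: {d: slot_of(n, d) for d in days} for n in persons}
--     return persons, pmap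
-- ===== Notes on version B (the rewrite author's own statement) =====
-- stated objective: alternative
-- what changed: A builds pmap by destructive updates: per day it writes pmap[n][d]=s for present names and then sweeps all persons with setdefault('off'); B has no update/override pass at all: it derives a pure function slot_of(n,d) (last matching slot, else 'off') and generates the whole table row-by-row with dict comprehensions over sorted persons and the deduplicated days.
import Mathlib
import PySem

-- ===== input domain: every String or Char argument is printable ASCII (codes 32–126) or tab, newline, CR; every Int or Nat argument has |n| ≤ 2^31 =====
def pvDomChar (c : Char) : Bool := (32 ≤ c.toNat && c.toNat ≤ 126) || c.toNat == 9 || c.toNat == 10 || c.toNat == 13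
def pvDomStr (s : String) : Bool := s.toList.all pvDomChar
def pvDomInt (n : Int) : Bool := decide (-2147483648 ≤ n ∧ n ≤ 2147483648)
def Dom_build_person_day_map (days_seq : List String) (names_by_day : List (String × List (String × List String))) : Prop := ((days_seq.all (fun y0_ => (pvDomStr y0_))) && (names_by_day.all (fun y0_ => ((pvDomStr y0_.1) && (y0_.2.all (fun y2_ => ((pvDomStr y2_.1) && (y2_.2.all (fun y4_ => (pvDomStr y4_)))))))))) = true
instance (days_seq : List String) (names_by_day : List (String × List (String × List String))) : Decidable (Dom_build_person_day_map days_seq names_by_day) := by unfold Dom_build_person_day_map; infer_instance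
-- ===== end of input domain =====

-- B replaces A's destructive per-day writes + setdefault('off') sweep by a pure per-cell
-- function slot_of(n,d) and dict comprehensions over sorted persons × deduplicated days
-- (objective: alternative); the return values are proved equal on Pre_.

-- ===== PORT A =====
-- the slot tuple ("full","am","pm","eve")
def pvSlots : List String := ["full", "am", "pm", "eve"]

-- names_by_day.get(d, {}).get(s, [])
def pvNames (names_by_day : List (String × List (String × List String))) (d s : String) : List String :=
  PySem.Dict.getD (PySem.Dict.mk (PySem.Dict.getD (PySem.Dict.mk names_by_day) d [])) s []

def build_person_day_map (days_seq : List String) (names_by_day : List (String × List (String × List String))) : List String × (List (String × List (String × String))) :=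
  -- persons = set(); nested collection loops; persons = sorted(persons, key=lambda x: x.lower())
  let persons :=
    PySem.List.sorted
      (days_seq.foldl (fun ps d =>
          pvSlots.foldl (fun ps s => (pvNames names_by_day d s).foldl PySem.Set.add ps) ps)
        PySem.Set.empty)
      (fun x => PySem.Str.lower x) false
  -- pmap = {n: {} for n in persons}
  let pmap : PySem.Dict String (PySem.Dict String String) :=
    persons.foldl (fun m n => m.insert n PySem.Dict.empty) PySem.Dict.empty
  -- for d in days_seq: first the slot assignments pmap[n][d] = s (n is always a key of pmap,
  -- so Dict.modify is exact), then the setdefault sweep over persons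
  let pmap := days_seq.foldl (fun m d =>
      persons.foldl (fun m n => m.modify n PySem.Dict.empty (fun dd => dd.setdefault d "off"))
        (pvSlots.foldl (fun m s =>
            (pvNames names_by_day d s).foldl
              (fun m n => m.modify n PySem.Dict.empty (fun dd => dd.insert d s)) m) m))
    pmap
  (persons, pmap.items.map (fun p => (p.1, p.2.items)))

-- ===== PORT B =====
-- Source B's helper slot_of(n, d): out = "off"; for s in slots: if n in …: out = s
def pvSlotOf (names_by_day : List (String × List (String × List String))) (n d : String) : String :=
  pvSlots.foldl (fun out s => if n ∈ pvNames names_by_day d s then s else out) "off"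

def build_person_day_map_alt (days_seq : List String) (names_by_day : List (String × List (String × List String))) : List String × (List (String × List (String × String))) :=
  -- persons = sorted({n for d in days_seq for s in slots for n in …}, key=lambda x: x.lower())
  let persons :=
    PySem.List.sorted
      (PySem.Set.ofList (days_seq.flatMap (fun d => pvSlots.flatMap (fun s => pvNames names_by_day d s))))
      (fun x => PySem.Str.lower x) false
  -- days = list(dict.fromkeys(days_seq))
  let days := PySem.List.dedup days_seq
  -- pmap = {n: {d: slot_of(n, d) for d in days} for n in persons}
  let pmap : PySem.Dict String (PySem.Dict String String) :=
    persons.foldl (fun m n =>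
        m.insert n (days.foldl (fun dd d => dd.insert d (pvSlotOf names_by_day n d)) PySem.Dict.empty))
      PySem.Dict.empty
  (persons, pmap.items.map (fun p => (p.1, p.2.items)))

-- ===== PRECONDITION & SPEC =====
-- every name occurring in a scheduled slot of a listed day
def pvAllNames (days_seq : List String) (names_by_day : List (String × List (String × List String))) : List String :=
  days_seq.flatMap (fun d => pvSlots.flatMap (fun s => pvNames names_by_day d s))

-- Pre_ excludes inputs on which two DISTINCT collected names coincide ignoring case: there
-- sorted(persons, key=lambda x: x.lower()) breaks the tie by Python's set iteration (hash)
-- order, which is not modelled; on all other inputs A is deterministic.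
def Pre_build_person_day_map (days_seq : List String) (names_by_day : List (String × List (String × List String))) : Prop :=
  (PySem.List.dedup (pvAllNames days_seq names_by_day)).Pairwise
    (fun a b => PySem.Str.lower a ≠ PySem.Str.lower b)
instance (days_seq : List String) (names_by_day : List (String × List (String × List String))) : Decidable (Pre_build_person_day_map days_seq names_by_day) := by unfold Pre_build_person_day_map; infer_instance

def pvWitness_build_person_day_map : List String × (List (String × List (String × List String))) :=
  (["mon"], [("mon", [("am", ["Al", "bo"])])])

def Spec_build_person_day_map (days_seq : List String) (names_by_day : List (String × List (String × List String))) (out : List String × (List (String × List (String × String)))) : Prop := out = build_person_day_map_alt days_seq names_by_day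
instance (days_seq : List String) (names_by_day : List (String × List (String × List String))) (out : List String × (List (String × List (String × String)))) : Decidable (Spec_build_person_day_map days_seq names_by_day out) := by unfold Spec_build_person_day_map; infer_instance

-- ===== CLAIM (what is proved, stated in full; the proofs are below) =====
def Claim_equal_build_person_day_map : Prop := ∀ (days_seq : List String) (names_by_day : List (String × List (String × List String))), Dom_build_person_day_map days_seq names_by_day → Pre_build_person_day_map days_seq names_by_day → Spec_build_person_day_map days_seq names_by_day (build_person_day_map days_seq names_by_day)

-- ===== LEMMAS AND PROOFS =====

-- A's collected-and-sorted persons list (abbreviation for the proofs)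
def pvPersons (days_seq : List String) (names_by_day : List (String × List (String × List String))) : List String :=
  PySem.List.sorted
    (days_seq.foldl (fun ps d =>
        pvSlots.foldl (fun ps s => (pvNames names_by_day d s).foldl PySem.Set.add ps) ps)
      PySem.Set.empty)
    (fun x => PySem.Str.lower x) false

-- a dict whose value at each key is a function of the key; every pmap state below has this shape
def pvTab {ν : Type} (ks : List String) (f : String → ν) : PySem.Dict String ν :=
  ⟨ks.map (fun k => (k, f k))⟩

theorem pvTab_congr {ν : Type} (ks : List String) (f g : String → ν)
    (h : ∀ k ∈ ks, f k = g k) : pvTab ks f = pvTab ks g := by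
  unfold pvTab
  congr 1
  exact List.map_congr_left (fun k hk => by rw [h k hk])

theorem pvTab_get? {ν : Type} (ks : List String) (f : String → ν) (k : String) :
    (pvTab ks f).get? k = if k ∈ ks then some (f k) else none := by
  induction ks with
  | nil => simp [pvTab, PySem.Dict.get?]
  | cons a t ih =>
    by_cases hk : a = k
    · subst hk; simp [pvTab, PySem.Dict.get?]
    · simp only [pvTab, PySem.Dict.get?, List.map_cons, List.find?_cons] at ih ⊢
      have : ((a, f a).1 == k) = false := by simpa using hk
      simp only [this]
      rw [ih]
      have hk' : k ≠ a := fun h => hk h.symm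
      simp [List.mem_cons, hk']

theorem pvTab_getD {ν : Type} (ks : List String) (f : String → ν) (k : String) (dflt : ν) :
    (pvTab ks f).getD k dflt = if k ∈ ks then f k else dflt := by
  simp only [PySem.Dict.getD, pvTab_get?]
  split <;> simp

theorem pvTab_contains {ν : Type} (ks : List String) (f : String → ν) (k : String) :
    (pvTab ks f).contains k = decide (k ∈ ks) := by
  induction ks with
  | nil => simp [pvTab, PySem.Dict.contains]
  | cons a t ih =>
    simp only [pvTab, PySem.Dict.contains, List.map_cons, List.any_cons] at ih ⊢
    rw [ih]
    by_cases h : k = a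
    · simp [h]
    · have h2 : ((a, f a).1 == k) = false := by simpa using fun hh => h hh.symm
      simp [h, h2]

theorem pvTab_insert_mem {ν : Type} (ks : List String) (f : String → ν) (k0 : String) (v : ν)
    (h : k0 ∈ ks) :
    (pvTab ks f).insert k0 v = pvTab ks (fun k => if k = k0 then v else f k) := by
  have hc : (pvTab ks f).contains k0 = true := by rw [pvTab_contains]; simpa
  simp only [PySem.Dict.insert, hc, if_pos]
  unfold pvTab
  congr 1
  rw [List.map_map]
  apply List.map_congr_left
  intro k _
  by_cases h2 : k = k0 <;> simp [h2, Function.comp]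

theorem pvTab_insert_not_mem {ν : Type} (ks : List String) (f : String → ν) (k0 : String) (v : ν)
    (h : k0 ∉ ks) :
    (pvTab ks f).insert k0 v = pvTab (ks ++ [k0]) (fun k => if k = k0 then v else f k) := by
  have hc : (pvTab ks f).contains k0 = false := by rw [pvTab_contains]; simpa
  simp only [PySem.Dict.insert, hc]
  unfold pvTab
  simp only [Bool.false_eq_true, if_false, List.map_append, List.map_cons, List.map_nil]
  have he : List.map (fun k => (k, f k)) ks
      = List.map (fun k => (k, if k = k0 then v else f k)) ks :=
    List.map_congr_left (fun k hk => by
      have hne : k ≠ k0 := fun hh => h (hh ▸ hk)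
      simp [hne])
  simp [he]

theorem pvTab_setdefault_mem {ν : Type} (ks : List String) (f : String → ν) (k0 : String) (v : ν)
    (h : k0 ∈ ks) : (pvTab ks f).setdefault k0 v = pvTab ks f := by
  have hc : (pvTab ks f).contains k0 = true := by rw [pvTab_contains]; simpa
  simp [PySem.Dict.setdefault, hc]

theorem pvTab_setdefault_not_mem {ν : Type} (ks : List String) (f : String → ν) (k0 : String)
    (v : ν) (h : k0 ∉ ks) :
    (pvTab ks f).setdefault k0 v = pvTab (ks ++ [k0]) (fun k => if k = k0 then v else f k) := by
  have hc : (pvTab ks f).contains k0 = false := by rw [pvTab_contains]; simpa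
  simp only [PySem.Dict.setdefault, hc, Bool.false_eq_true, if_false]
  unfold pvTab
  simp only [List.map_append, List.map_cons, List.map_nil]
  have he : List.map (fun k => (k, f k)) ks
      = List.map (fun k => (k, if k = k0 then v else f k)) ks :=
    List.map_congr_left (fun k hk => by
      have hne : k ≠ k0 := fun hh => h (hh ▸ hk)
      simp [hne])
  simp [he]

theorem pvTab_modify_mem {ν : Type} (ks : List String) (f : String → ν) (k0 : String) (dflt : ν)
    (g : ν → ν) (h : k0 ∈ ks) :
    (pvTab ks f).modify k0 dflt g = pvTab ks (fun k => if k = k0 then g (f k0) else f k) := by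
  simp only [PySem.Dict.modify, pvTab_getD, if_pos h]
  exact pvTab_insert_mem ks f k0 _ h

theorem dict_insert_insert {κ ν : Type} [BEq κ] [LawfulBEq κ] (dd : PySem.Dict κ ν) (k : κ)
    (v w : ν) : (dd.insert k v).insert k w = dd.insert k w := by
  have h1 : ((dd.insert k v).contains k) = true := PySem.Dict.contains_insert_self dd k v
  by_cases hc : dd.contains k = true
  · simp only [PySem.Dict.insert, hc, if_pos] at h1 ⊢
    simp only [h1, if_pos]
    congr 1
    rw [List.map_map]
    apply List.map_congr_left
    intro p _
    by_cases hp : p.1 = k <;> simp [hp, Function.comp]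
  · simp only [PySem.Dict.insert, hc, Bool.false_eq_true, if_false] at h1 ⊢
    simp only [h1, if_pos]
    have hall : ∀ p ∈ dd.items, (p.1 == k) = false := by
      intro p hp
      by_contra hb
      apply hc
      simp only [PySem.Dict.contains, List.any_eq_true]
      exact ⟨p, hp, by revert hb; simp⟩
    congr 1
    simp only [List.map_append, List.map_cons, List.map_nil]
    have he : dd.items.map (fun p => if p.1 == k then (k, w) else p) = dd.items := by
      have h4 := List.map_congr_left (l := dd.items)
        (f := fun p => if p.1 == k then (k, w) else p) (g := fun p => p)
        (fun p hp => by simp [hall p hp])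
      simpa using h4
    simp [he]

theorem dict_setdefault_setdefault {κ ν : Type} [BEq κ] [LawfulBEq κ] (dd : PySem.Dict κ ν)
    (k : κ) (v : ν) : (dd.setdefault k v).setdefault k v = dd.setdefault k v := by
  by_cases hc : dd.contains k = true
  · simp [PySem.Dict.setdefault, hc]
  · have h2 : (PySem.Dict.mk (dd.items ++ [(k, v)]) : PySem.Dict κ ν).contains k = true := by
      simp [PySem.Dict.contains]
    simp [PySem.Dict.setdefault, hc, h2]

theorem foldl_modify (P : List String) (xs : List String)
    (f : PySem.Dict String String → PySem.Dict String String)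
    (hf : ∀ dd, f (f dd) = f dd) (hx : ∀ n ∈ xs, n ∈ P)
    (G : String → PySem.Dict String String) :
    xs.foldl (fun m n => m.modify n PySem.Dict.empty f) (pvTab P G)
      = pvTab P (fun n => if n ∈ xs then f (G n) else G n) := by
  induction xs generalizing G with
  | nil => simp
  | cons n0 t ih =>
    simp only [List.foldl_cons]
    rw [pvTab_modify_mem P G n0 _ f (hx n0 (by simp))]
    rw [ih (fun n hn => hx n (by simp [hn]))]
    apply pvTab_congr; intro n _
    by_cases h1 : n = n0
    · subst h1
      by_cases h2 : n ∈ t <;> simp [h2, hf]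
    · simp [h1, List.mem_cons]

theorem foldl_slots (names_by_day : List (String × List (String × List String))) (d : String)
    (P : List String) (ss : List String)
    (hx : ∀ s ∈ ss, ∀ n ∈ pvNames names_by_day d s, n ∈ P)
    (G : String → PySem.Dict String String) :
    ss.foldl (fun m s =>
        (pvNames names_by_day d s).foldl
          (fun m n => m.modify n PySem.Dict.empty (fun dd => dd.insert d s)) m) (pvTab P G)
      = pvTab P (fun n =>
          ss.foldl (fun dd s => if n ∈ pvNames names_by_day d s then dd.insert d s else dd) (G n)) := by
  induction ss generalizing G with
  | nil => simp
  | cons s0 t ih =>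
    simp only [List.foldl_cons]
    rw [foldl_modify P (pvNames names_by_day d s0) (fun dd => dd.insert d s0)
      (fun dd => dict_insert_insert dd d s0 s0) (hx s0 (by simp)) G]
    rw [ih (fun s hs => hx s (by simp [hs]))]

theorem foldl_ins_of_insert (d : String) (c : String → Prop) [DecidablePred c]
    (ss : List String) : ∀ (v : String) (dd : PySem.Dict String String),
    ss.foldl (fun dd s => if c s then dd.insert d s else dd) (dd.insert d v)
      = dd.insert d (ss.foldl (fun v s => if c s then s else v) v) := by
  induction ss with
  | nil => intro v dd; simp
  | cons s t ih =>
    intro v dd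
    simp only [List.foldl_cons]
    by_cases hc : c s
    · simp only [if_pos hc]
      rw [dict_insert_insert, ih]
    · simp only [if_neg hc]
      exact ih v dd

theorem foldl_ins_none (d : String) (c : String → Prop) [DecidablePred c] (ss : List String)
    (h : ∀ s ∈ ss, ¬ c s) (dd : PySem.Dict String String) :
    ss.foldl (fun dd s => if c s then dd.insert d s else dd) dd = dd := by
  induction ss with
  | nil => simp
  | cons s t ih =>
    simp only [List.foldl_cons, if_neg (h s (by simp))]
    exact ih (fun s hs => h s (by simp [hs]))

theorem foldl_val_none (c : String → Prop) [DecidablePred c] (ss : List String)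
    (h : ∀ s ∈ ss, ¬ c s) (v : String) :
    ss.foldl (fun v s => if c s then s else v) v = v := by
  induction ss with
  | nil => simp
  | cons s t ih =>
    simp only [List.foldl_cons, if_neg (h s (by simp))]
    exact ih (fun s hs => h s (by simp [hs]))

theorem foldl_ins_some (d : String) (c : String → Prop) [DecidablePred c] (ss : List String)
    (h : ∃ s ∈ ss, c s) (dd : PySem.Dict String String) :
    ss.foldl (fun dd s => if c s then dd.insert d s else dd) dd
      = dd.insert d (ss.foldl (fun v s => if c s then s else v) "off") := by
  induction ss with
  | nil => simp at h
  | cons s t ih =>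
    simp only [List.foldl_cons]
    by_cases hc : c s
    · simp only [if_pos hc]
      rw [foldl_ins_of_insert]
    · simp only [if_neg hc]
      obtain ⟨s', hs', hcs'⟩ := h
      rcases List.mem_cons.mp hs' with h1 | h1
      · exact absurd (h1 ▸ hcs') hc
      · exact ih ⟨s', h1, hcs'⟩

theorem ofList_append_singleton {α : Type} [BEq α] (p : List α) (d : α) :
    PySem.Set.ofList (p ++ [d]) = PySem.Set.add (PySem.Set.ofList p) d := by
  simp [PySem.Set.ofList, List.foldl_append]

theorem set_add_eq {α : Type} [BEq α] [LawfulBEq α] (s : List α) (d : α) :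
    PySem.Set.add s d = if d ∈ s then s else s ++ [d] := by
  by_cases h : d ∈ s <;> simp [PySem.Set.add, h]

theorem innerA (names_by_day : List (String × List (String × List String))) (n d : String)
    (p : List String) :
    (pvSlots.foldl (fun dd s => if n ∈ pvNames names_by_day d s then dd.insert d s else dd)
        (pvTab (PySem.Set.ofList p) (pvSlotOf names_by_day n))).setdefault d "off"
      = pvTab (PySem.Set.ofList (p ++ [d])) (pvSlotOf names_by_day n) := by
  rw [ofList_append_singleton, set_add_eq]
  by_cases hex : ∃ s ∈ pvSlots, n ∈ pvNames names_by_day d s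
  · rw [foldl_ins_some d (fun s => n ∈ pvNames names_by_day d s) pvSlots hex]
    have hval : (pvSlots.foldl (fun v s => if n ∈ pvNames names_by_day d s then s else v) "off")
        = pvSlotOf names_by_day n d := rfl
    rw [hval]
    by_cases hd : d ∈ PySem.Set.ofList p
    · rw [pvTab_insert_mem _ _ _ _ hd]
      rw [pvTab_setdefault_mem _ _ _ _ hd]
      rw [if_pos hd]
      apply pvTab_congr; intro k _
      by_cases hk : k = d <;> simp [hk]
    · rw [pvTab_insert_not_mem _ _ _ _ hd]
      rw [pvTab_setdefault_mem _ _ _ _ (by simp)]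
      rw [if_neg hd]
      apply pvTab_congr; intro k _
      by_cases hk : k = d <;> simp [hk]
  · push Not at hex
    rw [foldl_ins_none d (fun s => n ∈ pvNames names_by_day d s) pvSlots hex]
    have hval : pvSlotOf names_by_day n d = "off" :=
      foldl_val_none (fun s => n ∈ pvNames names_by_day d s) pvSlots hex "off"
    by_cases hd : d ∈ PySem.Set.ofList p
    · rw [pvTab_setdefault_mem _ _ _ _ hd, if_pos hd]
    · rw [pvTab_setdefault_not_mem _ _ _ _ hd, if_neg hd]
      apply pvTab_congr; intro k _
      by_cases hk : k = d <;> simp [hk, hval]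

theorem foldl_insert_fresh_aux {ν : Type} (ks : List String) (f : String → ν) :
    ∀ (m0 : PySem.Dict String ν), ks.Nodup → (∀ k ∈ ks, m0.contains k = false) →
    ks.foldl (fun m n => m.insert n (f n)) m0 = ⟨m0.items ++ ks.map (fun k => (k, f k))⟩ := by
  induction ks with
  | nil => intro m0 _ _; simp
  | cons a t ih =>
    intro m0 hnd h
    simp only [List.foldl_cons]
    have hca : m0.contains a = false := h a (by simp)
    have hins : m0.insert a (f a) = ⟨m0.items ++ [(a, f a)]⟩ := by
      simp [PySem.Dict.insert, hca]
    rw [hins, ih _ hnd.of_cons]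
    · simp
    · intro k hk
      have hka : k ≠ a := fun hh => (List.nodup_cons.mp hnd).1 (hh ▸ hk)
      have := h k (by simp [hk])
      simp only [PySem.Dict.contains, List.any_append, List.any_cons, List.any_nil] at this ⊢
      simp only [this, Bool.false_or]
      simpa using fun hh : a = k => hka hh.symm

theorem foldl_insert_fresh {ν : Type} (ks : List String) (f : String → ν) (hk : ks.Nodup) :
    ks.foldl (fun m n => m.insert n (f n)) PySem.Dict.empty = pvTab ks f := by
  rw [foldl_insert_fresh_aux ks f PySem.Dict.empty hk (fun k _ => rfl)]
  rfl

theorem mem_add_fold (xs : List String) (ps : PySem.Set String) (x : String) :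
    x ∈ xs.foldl PySem.Set.add ps ↔ x ∈ ps ∨ x ∈ xs :=
  PySem.Set.mem_update ps xs x

theorem mem_slots_fold (names_by_day : List (String × List (String × List String))) (d : String)
    (ss : List String) (ps : PySem.Set String) (x : String) :
    x ∈ ss.foldl (fun ps s => (pvNames names_by_day d s).foldl PySem.Set.add ps) ps
      ↔ x ∈ ps ∨ ∃ s ∈ ss, x ∈ pvNames names_by_day d s := by
  induction ss generalizing ps with
  | nil => simp
  | cons s0 t ih =>
    simp only [List.foldl_cons]
    rw [ih, mem_add_fold]
    constructor
    · rintro ((h | h) | ⟨s, hs, h⟩)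
      · exact Or.inl h
      · exact Or.inr ⟨s0, by simp, h⟩
      · exact Or.inr ⟨s, by simp [hs], h⟩
    · rintro (h | ⟨s, hs, h⟩)
      · exact Or.inl (Or.inl h)
      · rcases List.mem_cons.mp hs with h1 | h1
        · exact Or.inl (Or.inr (h1 ▸ h))
        · exact Or.inr ⟨s, h1, h⟩

theorem mem_days_fold (names_by_day : List (String × List (String × List String)))
    (days : List String) (ps : PySem.Set String) (x : String) :
    x ∈ days.foldl (fun ps d =>
        pvSlots.foldl (fun ps s => (pvNames names_by_day d s).foldl PySem.Set.add ps) ps) ps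
      ↔ x ∈ ps ∨ ∃ d ∈ days, ∃ s ∈ pvSlots, x ∈ pvNames names_by_day d s := by
  induction days generalizing ps with
  | nil => simp
  | cons d0 t ih =>
    simp only [List.foldl_cons]
    rw [ih, mem_slots_fold]
    constructor
    · rintro ((h | ⟨s, hs, h⟩) | ⟨d, hd, hrest⟩)
      · exact Or.inl h
      · exact Or.inr ⟨d0, by simp, s, hs, h⟩
      · exact Or.inr ⟨d, by simp [hd], hrest⟩
    · rintro (h | ⟨d, hd, hrest⟩)
      · exact Or.inl (Or.inl h)
      · rcases List.mem_cons.mp hd with h1 | h1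
        · exact Or.inl (Or.inr (h1 ▸ hrest))
        · exact Or.inr ⟨d, h1, hrest⟩

theorem mem_collect (days_seq : List String) (names_by_day : List (String × List (String × List String)))
    (d s n : String) (hd : d ∈ days_seq) (hs : s ∈ pvSlots) (hn : n ∈ pvNames names_by_day d s) :
    n ∈ pvPersons days_seq names_by_day := by
  unfold pvPersons
  rw [PySem.List.mem_sorted]
  exact (mem_days_fold names_by_day days_seq PySem.Set.empty n).mpr
    (Or.inr ⟨d, hd, s, hs, hn⟩)

theorem nodup_slots_fold (names_by_day : List (String × List (String × List String))) (d : String)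
    (ss : List String) (ps : PySem.Set String) (h : ps.Nodup) :
    (ss.foldl (fun ps s => (pvNames names_by_day d s).foldl PySem.Set.add ps) ps).Nodup := by
  induction ss generalizing ps with
  | nil => exact h
  | cons s0 t ih =>
    exact ih _ (PySem.Set.nodup_update ps (pvNames names_by_day d s0) h)

theorem nodup_persons (days_seq : List String) (names_by_day : List (String × List (String × List String))) :
    (pvPersons days_seq names_by_day).Nodup := by
  have hbase : (days_seq.foldl (fun ps d =>
      pvSlots.foldl (fun ps s => (pvNames names_by_day d s).foldl PySem.Set.add ps) ps)
      PySem.Set.empty).Nodup := by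
    generalize hps : (PySem.Set.empty : PySem.Set String) = ps
    have hn : ps.Nodup := by rw [← hps]; exact List.nodup_nil
    clear hps
    induction days_seq generalizing ps with
    | nil => exact hn
    | cons d0 t ih => exact ih _ (nodup_slots_fold names_by_day d0 pvSlots ps hn)
  unfold pvPersons
  exact ((PySem.List.sorted_perm _ _ _).nodup_iff).mpr hbase

-- A's nested collection loops gather exactly the flattened name list: both are the same
-- Set.add-fold over the same element sequence
theorem collect_eq_ofList_flat (days_seq : List String)
    (names_by_day : List (String × List (String × List String))) :
    days_seq.foldl (fun ps d =>
        pvSlots.foldl (fun ps s => (pvNames names_by_day d s).foldl PySem.Set.add ps) ps)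
      PySem.Set.empty
      = PySem.Set.ofList (pvAllNames days_seq names_by_day) := by
  have key : ∀ (q : List String) (ps : PySem.Set String),
      q.foldl (fun ps d =>
          pvSlots.foldl (fun ps s => (pvNames names_by_day d s).foldl PySem.Set.add ps) ps) ps
        = (q.flatMap (fun d => pvSlots.flatMap (fun s => pvNames names_by_day d s))).foldl
            PySem.Set.add ps := by
    intro q
    induction q with
    | nil => intro ps; simp
    | cons d t ih =>
      intro ps
      simp only [List.foldl_cons, List.flatMap_cons, List.foldl_append, ih]
      congr 1
      generalize pvSlots = ss
      induction ss generalizing ps with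
      | nil => simp
      | cons s0 t2 ih2 => simp only [List.foldl_cons, List.flatMap_cons, List.foldl_append, ih2]
  rw [key, pvAllNames, PySem.Set.ofList_eq_foldl]
  rfl

theorem pvPersons_def (days_seq : List String)
    (names_by_day : List (String × List (String × List String))) :
    PySem.List.sorted
        (days_seq.foldl (fun ps d =>
            pvSlots.foldl (fun ps s => (pvNames names_by_day d s).foldl PySem.Set.add ps) ps)
          PySem.Set.empty)
        (fun x => PySem.Str.lower x) false = pvPersons days_seq names_by_day := rfl

theorem persons_eq (days_seq : List String)
    (names_by_day : List (String × List (String × List String))) :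
    pvPersons days_seq names_by_day
      = PySem.List.sorted
          (PySem.Set.ofList (days_seq.flatMap (fun d => pvSlots.flatMap (fun s => pvNames names_by_day d s))))
          (fun x => PySem.Str.lower x) false := by
  unfold pvPersons
  rw [collect_eq_ofList_flat]
  rfl

theorem daysA (names_by_day : List (String × List (String × List String))) (P : List String)
    (q : List String) (hq : ∀ d ∈ q, ∀ s ∈ pvSlots, ∀ n ∈ pvNames names_by_day d s, n ∈ P) :
    ∀ (p : List String),
    q.foldl (fun m d =>
        P.foldl (fun m n => m.modify n PySem.Dict.empty (fun dd => dd.setdefault d "off"))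
          (pvSlots.foldl (fun m s =>
              (pvNames names_by_day d s).foldl
                (fun m n => m.modify n PySem.Dict.empty (fun dd => dd.insert d s)) m) m))
      (pvTab P (fun n => pvTab (PySem.Set.ofList p) (pvSlotOf names_by_day n)))
      = pvTab P (fun n => pvTab (PySem.Set.ofList (p ++ q)) (pvSlotOf names_by_day n)) := by
  induction q with
  | nil => intro p; simp
  | cons d t ih =>
    intro p
    simp only [List.foldl_cons]
    rw [foldl_slots names_by_day d P pvSlots (hq d (by simp))]
    rw [foldl_modify P P (fun dd => dd.setdefault d "off")
      (fun dd => dict_setdefault_setdefault dd d "off") (fun n hn => hn)]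
    have hmid : pvTab P (fun n =>
        if n ∈ P then
          (pvSlots.foldl (fun dd s => if n ∈ pvNames names_by_day d s then dd.insert d s else dd)
            (pvTab (PySem.Set.ofList p) (pvSlotOf names_by_day n))).setdefault d "off"
        else
          pvSlots.foldl (fun dd s => if n ∈ pvNames names_by_day d s then dd.insert d s else dd)
            (pvTab (PySem.Set.ofList p) (pvSlotOf names_by_day n)))
        = pvTab P (fun n => pvTab (PySem.Set.ofList (p ++ [d])) (pvSlotOf names_by_day n)) := by
      apply pvTab_congr; intro n hn
      rw [if_pos hn]
      exact innerA names_by_day n d p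
    rw [hmid, ih (fun d' hd' => hq d' (by simp [hd'])) (p ++ [d])]
    simp

theorem pv_main_eq (days : List String) (nbd : List (String × List (String × List String))) :
    build_person_day_map days nbd = build_person_day_map_alt days nbd := by
  have hnd := nodup_persons days nbd
  have hmem : ∀ d ∈ days, ∀ s ∈ pvSlots, ∀ n ∈ pvNames nbd d s, n ∈ pvPersons days nbd :=
    fun d hd s hs n hn => mem_collect days nbd d s n hd hs hn
  simp only [build_person_day_map, build_person_day_map_alt]
  rw [pvPersons_def days nbd, ← persons_eq days nbd]
  -- A's pmap
  have hA0 : (pvPersons days nbd).foldl (fun m n => m.insert n PySem.Dict.empty) PySem.Dict.empty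
      = pvTab (pvPersons days nbd)
          (fun n => pvTab (PySem.Set.ofList ([] : List String)) (pvSlotOf nbd n)) := by
    rw [foldl_insert_fresh _ _ hnd]; rfl
  rw [hA0, daysA nbd _ days hmem []]
  -- B's pmap: each inner comprehension over nodup dedup'ed days is a fresh-insert fold
  have hinner : ∀ n : String,
      (PySem.List.dedup days).foldl (fun dd d => dd.insert d (pvSlotOf nbd n d)) PySem.Dict.empty
        = pvTab (PySem.List.dedup days) (pvSlotOf nbd n) :=
    fun n => foldl_insert_fresh _ _ (PySem.List.nodup_dedup days)
  have hB0 : (pvPersons days nbd).foldl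
      (fun m n => m.insert n
        ((PySem.List.dedup days).foldl (fun dd d => dd.insert d (pvSlotOf nbd n d)) PySem.Dict.empty))
      PySem.Dict.empty
      = pvTab (pvPersons days nbd) (fun n => pvTab (PySem.List.dedup days) (pvSlotOf nbd n)) := by
    have := foldl_insert_fresh (pvPersons days nbd)
      (fun n => (PySem.List.dedup days).foldl (fun dd d => dd.insert d (pvSlotOf nbd n d)) PySem.Dict.empty) hnd
    rw [this]
    exact pvTab_congr _ _ _ (fun n _ => hinner n)
  rw [hB0]
  have hdays : PySem.List.dedup days = PySem.Set.ofList (([] : List String) ++ days) := by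
    simp [PySem.List.dedup_eq_ofList]
  rw [hdays]

-- ===== VERDICT (by name: the statement is the Claim_ definition above) =====
theorem build_person_day_map_spec : Claim_equal_build_person_day_map := by
  intro days_seq names_by_day _ _
  unfold Spec_build_person_day_map
  exact pv_main_eq days_seq names_by_day
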